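-- pv_equiv track=rewrite | github.com/emerging-welfare/pipeline_scoring | score.py | BIO_to_sents
-- ===== SOURCE A (Python) =====
-- def BIO_to_sents(token_list, label_list):
--     token_labels = []
--     all_tokens = []
--     tokens = []
--     labels = []
--     prev_token_label = "O"
--     for token,label in zip(token_list, label_list):
--         if token == "[SEP]":
--             token_labels.append(labels)
--             all_tokens.append(tokens)
--             tokens = []
--             labels = []
--         elif token == "SAMPLE_START":
--             continue
--         elif token == "":
--             continue
--         else:
--             if label.startswith("I-") and (prev_token_label == "O" or prev_token_label[2:] != label[2:]):
--                 label = "B-" + label[2:]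
--
--             labels.append(label)
--             prev_token_label = label
--             tokens.append(token)
--
--     token_labels.append(labels) # add last sentence
--     all_tokens.append(tokens)
--     return token_labels, all_tokens
-- ===== SOURCE B (Python) =====
-- def _clean_stream(token_list, label_list):
--     # Phase 1: flatten to a cleaned stream: None marks a sentence break,
--     # (token, label) is a repaired real token; prev label threads through
--     # breaks and skipped items unchanged.
--     entries = []
--     prev_token_label = "O"
--     for token, label in zip(token_list, label_list):
--         if token == "[SEP]":
--             entries.append(None)
--         elif token == "SAMPLE_START" or token == "":
--             continue
--         else:
--             if label.startswith("I-") and (prev_token_label == "O" or prev_token_label[2:] != label[2:]):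
--                 label = "B-" + label[2:]
--             entries.append((token, label))
--             prev_token_label = label
--     return entries
--
-- def _split_sents(entries):
--     # Phase 2: split the cleaned stream at the break markers.
--     out_labels, out_tokens = [], []
--     cur_labels, cur_tokens = [], []
--     for e in entries:
--         if e is None:
--             out_labels.append(cur_labels)
--             out_tokens.append(cur_tokens)
--             cur_labels, cur_tokens = [], []
--         else:
--             cur_labels.append(e[1])
--             cur_tokens.append(e[0])
--     out_labels.append(cur_labels)
--     out_tokens.append(cur_tokens)
--     return out_labels, out_tokens
--
-- def BIO_to_sents(token_list, label_list):
--     return _split_sents(_clean_stream(token_list, label_list))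
-- ===== Notes on version B (the rewrite author's own statement) =====
-- stated objective: alternative
-- what changed: Replaces A's single fused loop by a two-phase pipeline: pass 1 flattens the zipped streams into a cleaned entry stream (break markers + repaired labels, threading the previous label through breaks), pass 2 splits that stream at the markers into sentences.
import Mathlib
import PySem

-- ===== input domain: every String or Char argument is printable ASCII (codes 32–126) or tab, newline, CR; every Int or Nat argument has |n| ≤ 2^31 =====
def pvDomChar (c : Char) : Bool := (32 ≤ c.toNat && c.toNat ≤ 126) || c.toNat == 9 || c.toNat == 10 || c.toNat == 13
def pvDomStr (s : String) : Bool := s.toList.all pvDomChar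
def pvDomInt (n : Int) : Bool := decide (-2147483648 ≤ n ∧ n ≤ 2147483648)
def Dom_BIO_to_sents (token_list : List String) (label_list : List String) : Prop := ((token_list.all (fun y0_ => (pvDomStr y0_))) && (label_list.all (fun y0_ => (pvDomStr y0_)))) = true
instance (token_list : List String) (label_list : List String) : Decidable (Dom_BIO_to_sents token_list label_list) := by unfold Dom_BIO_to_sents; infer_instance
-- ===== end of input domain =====

-- B replaces A's single fused loop by a two-phase pipeline (clean stream, then split); objective: alternative decomposition, same cost.


-- ===== PORT A =====
-- A's single loop over zip(token_list, label_list), threading all five state pieces.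
def BIO_loopA : List (String × String) → List (List String) → List (List String) →
    List String → List String → String → List (List String) × List (List String)
  | [], token_labels, all_tokens, tokens, labels, _ =>
      (token_labels ++ [labels], all_tokens ++ [tokens])
  | (token, label) :: rest, token_labels, all_tokens, tokens, labels, prev =>
      if token = "[SEP]" then
        BIO_loopA rest (token_labels ++ [labels]) (all_tokens ++ [tokens]) [] [] prev
      else if token = "SAMPLE_START" then
        BIO_loopA rest token_labels all_tokens tokens labels prev
      else if token = "" then
        BIO_loopA rest token_labels all_tokens tokens labels prev
      else
        let label' :=
          if PySem.Str.startswith label "I-" = true ∧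
             (prev = "O" ∨ PySem.Str.slice prev (some 2) none ≠ PySem.Str.slice label (some 2) none)
          then "B-" ++ PySem.Str.slice label (some 2) none else label
        BIO_loopA rest token_labels all_tokens (tokens ++ [token]) (labels ++ [label']) label'

def BIO_to_sents (token_list : List String) (label_list : List String) :
    List (List String) × List (List String) :=
  BIO_loopA (token_list.zip label_list) [] [] [] [] "O"

-- ===== PORT B =====
-- Phase 1: cleaned entry stream (none = sentence break, some = repaired token).
def BIO_cleanStream : List (String × String) → String → List (Option (String × String))
  | [], _ => []
  | (token, label) :: rest, prev =>
      if token = "[SEP]" then none :: BIO_cleanStream rest prev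
      else if token = "SAMPLE_START" ∨ token = "" then BIO_cleanStream rest prev
      else
        let label' :=
          if PySem.Str.startswith label "I-" = true ∧
             (prev = "O" ∨ PySem.Str.slice prev (some 2) none ≠ PySem.Str.slice label (some 2) none)
          then "B-" ++ PySem.Str.slice label (some 2) none else label
        some (token, label') :: BIO_cleanStream rest label'

-- Phase 2: split the cleaned stream at the break markers.
def BIO_splitSents : List (Option (String × String)) → List (List String) → List (List String) →
    List String → List String → List (List String) × List (List String)
  | [], outL, outT, curL, curT => (outL ++ [curL], outT ++ [curT])
  | none :: es, outL, outT, curL, curT => BIO_splitSents es (outL ++ [curL]) (outT ++ [curT]) [] []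
  | some (t, l) :: es, outL, outT, curL, curT => BIO_splitSents es outL outT (curL ++ [l]) (curT ++ [t])

def BIO_to_sents_alt (token_list : List String) (label_list : List String) :
    List (List String) × List (List String) :=
  BIO_splitSents (BIO_cleanStream (token_list.zip label_list) "O") [] [] [] []

-- ===== PRECONDITION & SPEC =====
def Spec_BIO_to_sents (token_list : List String) (label_list : List String) (out : List (List String) × List (List String)) : Prop := out = BIO_to_sents_alt token_list label_list
instance (token_list : List String) (label_list : List String) (out : List (List String) × List (List String)) : Decidable (Spec_BIO_to_sents token_list label_list out) := by unfold Spec_BIO_to_sents; infer_instance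

-- ===== CLAIM (what is proved, stated in full; the proofs are below) =====
def Claim_equal_BIO_to_sents : Prop := ∀ (token_list : List String) (label_list : List String), Dom_BIO_to_sents token_list label_list → Spec_BIO_to_sents token_list label_list (BIO_to_sents token_list label_list)

-- ===== LEMMAS AND PROOFS =====
theorem BIO_split_clean_eq_loopA (ps : List (String × String)) :
    ∀ (outL outT : List (List String)) (curL curT : List String) (prev : String),
    BIO_splitSents (BIO_cleanStream ps prev) outL outT curL curT =
      BIO_loopA ps outL outT curT curL prev := by
  induction ps with
  | nil => intro outL outT curL curT prev; simp [BIO_cleanStream, BIO_splitSents, BIO_loopA]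
  | cons p rest ih =>
      intro outL outT curL curT prev
      obtain ⟨token, label⟩ := p
      by_cases hsep : token = "[SEP]"
      · simp [BIO_cleanStream, BIO_splitSents, BIO_loopA, hsep, ih]
      · by_cases hss : token = "SAMPLE_START"
        · simp [BIO_cleanStream, BIO_loopA, hss, ih]
        · by_cases hemp : token = ""
          · simp [BIO_cleanStream, BIO_loopA, hemp, ih]
          · simp [BIO_cleanStream, BIO_splitSents, BIO_loopA, hsep, hss, hemp, ih]

-- ===== VERDICT (by name: the statement is the Claim_ definition above) =====
theorem BIO_to_sents_spec : Claim_equal_BIO_to_sents := by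
  intro token_list label_list _
  unfold Spec_BIO_to_sents BIO_to_sents BIO_to_sents_alt
  exact (BIO_split_clean_eq_loopA _ _ _ _ _ _).symm
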